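-- pv_equiv track=rewrite | github.com/jaidaken/bw1-decomp | scripts/decompilation/objdiff.py | bytes_match
-- ===== SOURCE A (Python) =====
-- def bytes_match(exp_bytes, got_bytes, got_relocs):
--     """Compare instruction bytes, ignoring positions covered by relocations.
--
--     got_relocs is a set of byte offsets in got_bytes that are linker-filled.
--     The corresponding positions in exp_bytes hold the final linked values
--     which will always differ from the .o placeholder — so we skip them.
--     """
--     if len(exp_bytes) != len(got_bytes):
--         return False
--     for i in range(len(exp_bytes)):
--         if i in got_relocs:
--             continue
--         if exp_bytes[i] != got_bytes[i]:
--             return False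
--     return True
-- ===== SOURCE B (Python) =====
-- def bytes_match(exp_bytes, got_bytes, got_relocs):
--     if len(exp_bytes) != len(got_bytes):
--         return False
--     diffs = {i for i, (e, g) in enumerate(zip(exp_bytes, got_bytes)) if e != g}
--     return diffs.issubset(got_relocs)
-- ===== Notes on version B (the rewrite author's own statement) =====
-- stated objective: alternative
-- what changed: Replaces the short-circuit index loop with membership-skip by a collect-then-check decomposition: one pass over zip(exp,got) builds the set of mismatching indices, and the answer is a subset test against the relocation set.
import Mathlib
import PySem

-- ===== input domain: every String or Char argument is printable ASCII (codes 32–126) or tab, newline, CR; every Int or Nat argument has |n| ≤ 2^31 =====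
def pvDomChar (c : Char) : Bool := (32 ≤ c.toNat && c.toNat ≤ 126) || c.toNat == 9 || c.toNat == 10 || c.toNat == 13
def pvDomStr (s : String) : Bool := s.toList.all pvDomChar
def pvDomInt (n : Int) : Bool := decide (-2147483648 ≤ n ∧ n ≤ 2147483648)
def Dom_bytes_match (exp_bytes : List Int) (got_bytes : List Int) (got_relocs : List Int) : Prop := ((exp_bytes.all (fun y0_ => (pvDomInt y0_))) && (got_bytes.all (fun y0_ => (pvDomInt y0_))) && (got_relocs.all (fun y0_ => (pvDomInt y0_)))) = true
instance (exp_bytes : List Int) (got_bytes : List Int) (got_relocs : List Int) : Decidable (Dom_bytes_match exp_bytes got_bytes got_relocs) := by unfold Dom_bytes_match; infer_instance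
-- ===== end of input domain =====

-- B replaces A's short-circuit index loop by a collect-then-check decomposition:
-- gather the set of mismatching indices, then test inclusion in the relocation set.

-- ===== PORT A =====
-- A's for-loop over range(len(exp_bytes)) with continue / early return False.
-- Indices come from range(len(exp_bytes)) and the lengths are equal at that point,
-- so exp_bytes[i] / got_bytes[i] never raise; pyGetD with default 0 is exact here.
def bytes_match_loopA (exp_bytes got_bytes got_relocs : List Int) : List Int → Bool
  | [] => true
  | i :: rest =>
    if PySem.Set.contains got_relocs i then
      bytes_match_loopA exp_bytes got_bytes got_relocs rest
    else if PySem.List.pyGetD exp_bytes i 0 ≠ PySem.List.pyGetD got_bytes i 0 then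
      false
    else
      bytes_match_loopA exp_bytes got_bytes got_relocs rest

def bytes_match (exp_bytes : List Int) (got_bytes : List Int) (got_relocs : List Int) : Bool :=
  if exp_bytes.length ≠ got_bytes.length then false
  else bytes_match_loopA exp_bytes got_bytes got_relocs
        (PySem.List.pyRange 0 exp_bytes.length 1)

-- ===== PORT B =====
def bytes_match_alt (exp_bytes : List Int) (got_bytes : List Int) (got_relocs : List Int) : Bool :=
  if exp_bytes.length ≠ got_bytes.length then false
  else
    let diffs : PySem.Set Int :=
      PySem.Set.ofList
        (((PySem.List.enumerate (exp_bytes.zip got_bytes) 0).filter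
            (fun p => p.2.1 ≠ p.2.2)).map (fun p => p.1))
    PySem.Set.issubset diffs got_relocs

-- ===== PRECONDITION & SPEC =====
def Spec_bytes_match (exp_bytes : List Int) (got_bytes : List Int) (got_relocs : List Int) (out : Bool) : Prop := out = bytes_match_alt exp_bytes got_bytes got_relocs
instance (exp_bytes : List Int) (got_bytes : List Int) (got_relocs : List Int) (out : Bool) : Decidable (Spec_bytes_match exp_bytes got_bytes got_relocs out) := by unfold Spec_bytes_match; infer_instance

-- ===== CLAIM (what is proved, stated in full; the proofs are below) =====
def Claim_equal_bytes_match : Prop := ∀ (exp_bytes : List Int) (got_bytes : List Int) (got_relocs : List Int), Dom_bytes_match exp_bytes got_bytes got_relocs → Spec_bytes_match exp_bytes got_bytes got_relocs (bytes_match exp_bytes got_bytes got_relocs)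

-- ===== LEMMAS AND PROOFS =====

-- A's loop is an all-quantifier over the index list (the early return only skips work).
lemma loopA_eq_all (e g r : List Int) (l : List Int) :
    bytes_match_loopA e g r l =
      l.all (fun i => PySem.Set.contains r i ||
        (PySem.List.pyGetD e i 0 == PySem.List.pyGetD g i 0)) := by
  induction l with
  | nil => rfl
  | cons i rest ih =>
      simp only [bytes_match_loopA, List.all_cons]
      split_ifs with h1 h2
      · rw [ih, h1, Bool.true_or, Bool.true_and]
      · have hb : (PySem.List.pyGetD e i 0 == PySem.List.pyGetD g i 0) = false := by
          simp [h2]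
        simp only [Bool.not_eq_true] at h1
        rw [h1, hb]
        simp
      · have hb : (PySem.List.pyGetD e i 0 == PySem.List.pyGetD g i 0) = true := by
          simp only [not_not] at h2
          simp [h2]
        simp only [Bool.not_eq_true] at h1
        rw [ih, h1, hb]
        simp

-- the two programs agree: both say "lengths equal and every differing index is a reloc"
theorem bytes_match_eq (e g r : List Int) :
    bytes_match e g r = bytes_match_alt e g r := by
  unfold bytes_match bytes_match_alt
  by_cases hlen : e.length = g.length
  · simp only [hlen, ne_eq, not_true_eq_false, if_false]
    rw [loopA_eq_all]
    rw [Bool.eq_iff_iff, List.all_eq_true, PySem.Set.issubset_iff]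
    constructor
    · intro h x hx
      rw [PySem.Set.mem_ofList] at hx
      simp only [List.mem_map, List.mem_filter] at hx
      obtain ⟨p, ⟨hp, hne⟩, rfl⟩ := hx
      rw [PySem.List.mem_enumerate_iff] at hp
      obtain ⟨k, hk, rfl⟩ := hp
      have hkn : k < g.length := by simpa [hlen] using hk
      have hke : k < e.length := by simpa [hlen] using hkn
      simp only [decide_eq_true_eq, List.getElem_zip] at hne
      have hmem : ((0 : Int) + k) ∈ PySem.List.pyRange 0 (g.length) 1 := by
        rw [PySem.List.mem_pyRange_one]
        constructor
        · positivity
        · simpa using (by exact_mod_cast hkn : (k : Int) < (g.length : Int))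
      have hh := h _ hmem
      simp only [Bool.or_eq_true, beq_iff_eq] at hh
      rcases hh with hmem' | heq
      · simpa [PySem.Set.contains_iff] using hmem'
      · exfalso
        apply hne
        have h0 : ((0:Int) + (k:Int)) = (k : Int) := by ring
        rw [h0, PySem.List.pyGetD_natCast, PySem.List.pyGetD_natCast,
            List.getD_eq_getElem e 0 hke, List.getD_eq_getElem g 0 hkn] at heq
        exact heq
    · intro h i hi
      rw [PySem.List.mem_pyRange_one] at hi
      obtain ⟨h0, h1⟩ := hi
      set k : Nat := i.toNat with hkdef
      have hik : i = (k : Int) := by omega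
      have hkg : k < g.length := by omega
      have hke : k < e.length := by omega
      simp only [Bool.or_eq_true, beq_iff_eq]
      by_cases heq : e[k] = g[k]
      · right
        rw [hik, PySem.List.pyGetD_natCast, PySem.List.pyGetD_natCast,
            List.getD_eq_getElem e 0 hke, List.getD_eq_getElem g 0 hkg, heq]
      · left
        have hx : i ∈ (((PySem.List.enumerate (e.zip g) 0).filter
            (fun p => p.2.1 ≠ p.2.2)).map (fun p => p.1)) := by
          simp only [List.mem_map, List.mem_filter]
          refine ⟨((0:Int) + k, (e.zip g)[k]'(by simp [hlen]; omega)), ⟨?_, ?_⟩, by omega⟩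
          · rw [PySem.List.mem_enumerate_iff]
            exact ⟨k, by simp [hlen]; omega, rfl⟩
          · simpa [List.getElem_zip] using heq
        have hir := h i ((PySem.Set.mem_ofList _ _).mpr hx)
        simpa [PySem.Set.contains_iff] using hir
  · simp [hlen]

-- ===== VERDICT (by name: the statement is the Claim_ definition above) =====
theorem bytes_match_spec : Claim_equal_bytes_match := by
  intro e g r _
  unfold Spec_bytes_match
  exact bytes_match_eq e g r
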